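-- pv_equiv track=rewrite | github.com/MrBrantCode/unitest_baseline | mut_generate/mist_train_cf/cf_15363/solution.py | is_prime_with_prime_index
-- ===== SOURCE A (Python) =====
-- import math
--
-- def is_prime_with_prime_index(arr):
--     def is_prime(n):
--         if n <= 1:
--             return False
--         for i in range(2, int(math.sqrt(n)) + 1):
--             if n % i == 0:
--                 return False
--         return True
--
--     prime_indexes = [i for i in range(len(arr)) if is_prime(i)]
--     prime_numbers = [arr[i] for i in prime_indexes]
--     for num in prime_numbers:
--         if is_prime(num):
--             return True
--     return False
-- ===== SOURCE B (Python) =====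
-- def is_prime_with_prime_index(arr):
--     # Generate prime indices incrementally: trial-divide each index only by the
--     # primes already found (stopping at p*p > i); test values with odd-step division.
--     def value_is_prime(m):
--         if m < 2:
--             return False
--         if m % 2 == 0:
--             return m == 2
--         d = 3
--         while d * d <= m:
--             if m % d == 0:
--                 return False
--             d += 2
--         return True
--
--     primes = []
--     for i in range(2, len(arr)):
--         composite = False
--         for p in primes:
--             if p * p > i:
--                 break
--             if i % p == 0:
--                 composite = True
--                 break
--         if not composite:
--             primes.append(i)
--             if value_is_prime(arr[i]):
--                 return True
--     return False
-- ===== Notes on version B (the rewrite author's own statement) =====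
-- stated objective: faster
-- what changed: Prime indices are generated incrementally by trial-dividing each index only by the primes already found (breaking once p*p > i), fused with the value test into one early-exiting pass, and values are tested with an odd-step divisor loop instead of A's full range(2, sqrt+1) scan per index plus two intermediate lists.
import Mathlib
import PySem

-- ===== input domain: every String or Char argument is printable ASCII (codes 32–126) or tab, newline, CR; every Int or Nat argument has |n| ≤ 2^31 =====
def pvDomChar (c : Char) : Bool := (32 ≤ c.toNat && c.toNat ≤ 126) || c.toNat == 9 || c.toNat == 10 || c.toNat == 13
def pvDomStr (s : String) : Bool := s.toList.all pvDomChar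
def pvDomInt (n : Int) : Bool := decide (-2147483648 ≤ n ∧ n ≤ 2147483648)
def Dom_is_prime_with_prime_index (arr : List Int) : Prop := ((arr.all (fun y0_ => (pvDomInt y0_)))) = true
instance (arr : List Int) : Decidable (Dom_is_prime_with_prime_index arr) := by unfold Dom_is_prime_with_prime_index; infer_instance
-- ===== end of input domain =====

-- B replaces A's per-index full trial division by incremental trial division by the
-- primes found so far (stopping at p*p > i) and an odd-step value test (objective: faster).

-- ===== PORT A =====
-- A's inner is_prime: trial division by all d in range(2, int(sqrt(n))+1).
-- int(math.sqrt n) = Nat.sqrt n.toNat exactly for the domain's 2 ≤ n ≤ 2^31.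
def aIsPrime (n : Int) : Bool :=
  if n ≤ 1 then false
  else (PySem.List.pyRange 2 ((n.toNat.sqrt : Int) + 1)).all
         (fun i => !(PySem.Int.mod n i == 0))

def is_prime_with_prime_index (arr : List Int) : Bool :=
  let prime_indexes := (PySem.List.pyRange 0 (arr.length : Int)).filter (fun i => aIsPrime i)
  let prime_numbers := prime_indexes.map (fun i => PySem.List.pyGetD arr i 0)
  prime_numbers.any (fun num => aIsPrime num)

-- ===== PORT B =====
-- value_is_prime's odd-step while loop (m ≥ 3 odd here, so on Nat via toNat)
def altOddLoop (m d : Nat) : Bool :=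
  if h : d * d ≤ m then
    if m % d == 0 then false else altOddLoop m (d + 2)
  else true
termination_by m + 2 - d
decreasing_by
  have h2 : d ≤ d * d := by nlinarith
  omega

def altValuePrime (m : Int) : Bool :=
  if m < 2 then false
  else if PySem.Int.mod m 2 == 0 then m == 2
  else altOddLoop m.toNat 3

-- the inner 'for p in primes' scan with its two breaks
def altScan (i : Nat) : List Nat → Bool
  | [] => false
  | p :: ps => if i < p * p then false
               else if i % p == 0 then true
               else altScan i ps

-- the main 'for i in range(2, len(arr))' loop carrying the primes accumulator
def altGo (arr : List Int) (i : Nat) (primes : List Nat) : Bool :=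
  if h : i < arr.length then
    if altScan i primes then altGo arr (i + 1) primes
    else if altValuePrime arr[i] then true
    else altGo arr (i + 1) (primes ++ [i])
  else false
termination_by arr.length - i

def is_prime_with_prime_index_alt (arr : List Int) : Bool := altGo arr 2 []

-- ===== PRECONDITION & SPEC =====
def Spec_is_prime_with_prime_index (arr : List Int) (out : Bool) : Prop := out = is_prime_with_prime_index_alt arr
instance (arr : List Int) (out : Bool) : Decidable (Spec_is_prime_with_prime_index arr out) := by unfold Spec_is_prime_with_prime_index; infer_instance

-- ===== CLAIM (what is proved, stated in full; the proofs are below) =====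
def Claim_equal_is_prime_with_prime_index : Prop := ∀ (arr : List Int), Dom_is_prime_with_prime_index arr → Spec_is_prime_with_prime_index arr (is_prime_with_prime_index arr)

-- ===== LEMMAS AND PROOFS =====

-- the list of primes below i, in increasing order: value of B's accumulator at step i
def primesUpto (i : Nat) : List Nat := (List.range i).filter (fun p => decide (Nat.Prime p))

lemma aIsPrime_eq (n : Int) : aIsPrime n = decide (2 ≤ n ∧ Nat.Prime n.toNat) := by
  unfold aIsPrime
  by_cases h1 : n ≤ 1
  · rw [if_pos h1]; symm; simp; omega
  · rw [if_neg h1]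
    have hn : ((n.toNat : Int)) = n := Int.toNat_of_nonneg (by omega)
    rw [Bool.eq_iff_iff]
    simp only [List.all_eq_true, decide_eq_true_iff]
    constructor
    · intro hall
      refine ⟨by omega, ?_⟩
      rw [Nat.prime_def_le_sqrt]
      refine ⟨by omega, fun m hm hms hdvd => ?_⟩
      have hmem : (m : Int) ∈ PySem.List.pyRange 2 ((n.toNat.sqrt : Int) + 1) := by
        rw [PySem.List.mem_pyRange_one]
        exact ⟨by exact_mod_cast hm, by omega⟩
      have h := hall _ hmem
      simp only [Bool.not_eq_true', beq_eq_false_iff_ne, ne_eq,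
        PySem.Int.mod_eq_zero_iff_dvd] at h
      apply h
      rw [← hn]; exact_mod_cast hdvd
    · rintro ⟨-, hp⟩ i hi
      rw [PySem.List.mem_pyRange_one] at hi
      simp only [Bool.not_eq_true', beq_eq_false_iff_ne, ne_eq,
        PySem.Int.mod_eq_zero_iff_dvd]
      intro hdvd
      rw [Nat.prime_def_le_sqrt] at hp
      apply hp.2 i.toNat (by omega) (by omega)
      have hi' : ((i.toNat : Int)) = i := Int.toNat_of_nonneg (by omega)
      rw [← Int.natCast_dvd_natCast, hi', hn]
      exact hdvd

lemma altOddLoop_iff (m d : Nat) :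
    altOddLoop m d = true ↔ ∀ k, (d + 2*k) * (d + 2*k) ≤ m → ¬ (d + 2*k) ∣ m := by
  fun_induction altOddLoop m d with
  | case1 d hle heq =>
    simp only [Bool.false_eq_true, false_iff]
    intro hall
    exact hall 0 (by simpa using hle) (by simpa using Nat.dvd_of_mod_eq_zero (by simpa using heq))
  | case2 d hle hne ih =>
    rw [ih]
    constructor
    · intro hall k hk
      match k with
      | 0 =>
        simp only [Nat.mul_zero, Nat.add_zero]
        intro hd
        exact (by simpa using hne : ¬ m % d = 0) (Nat.mod_eq_zero_of_dvd hd)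
      | k+1 =>
        have := hall k
        have heq : d + 2 + 2 * k = d + 2 * (k + 1) := by omega
        rw [heq] at this
        exact this hk
    · intro hall k hk
      have := hall (k+1)
      have heq : d + 2 * (k + 1) = d + 2 + 2 * k := by omega
      rw [heq] at this
      exact this hk
  | case3 d hgt =>
    simp only [true_iff]
    intro k hk
    exfalso
    have : d * d ≤ (d + 2*k) * (d + 2*k) := by nlinarith
    omega

lemma altValuePrime_eq (m : Int) : altValuePrime m = decide (2 ≤ m ∧ Nat.Prime m.toNat) := by
  unfold altValuePrime
  by_cases h1 : m < 2
  · rw [if_pos h1]; symm; simp; omega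
  · rw [if_neg h1]
    have h2 : 2 ≤ m := by omega
    have hm : ((m.toNat : Int)) = m := Int.toNat_of_nonneg (by omega)
    have hM2 : 2 ≤ m.toNat := by omega
    by_cases he : PySem.Int.mod m 2 == 0
    · rw [if_pos he]
      have hdvd : (2:Int) ∣ m := by
        rw [← PySem.Int.mod_eq_zero_iff_dvd]; simpa using he
      have hdvdN : 2 ∣ m.toNat := by zify; rw [hm]; exact hdvd
      rw [Bool.eq_iff_iff]
      simp only [beq_iff_eq, decide_eq_true_iff]
      constructor
      · rintro rfl; exact ⟨by norm_num, by decide⟩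
      · rintro ⟨-, hp⟩
        rcases (Nat.Prime.eq_one_or_self_of_dvd hp 2 hdvdN) with h | h
        · omega
        · omega
    · rw [if_neg he]
      have hModd : m.toNat % 2 = 1 := by
        have hnd : ¬ (2:Int) ∣ m := by
          rw [← PySem.Int.mod_eq_zero_iff_dvd]; simpa using he
        have : ¬ 2 ∣ m.toNat := by
          intro h; exact hnd (by zify at h; rwa [hm] at h)
        omega
      have hM3 : 3 ≤ m.toNat := by omega
      rw [Bool.eq_iff_iff, altOddLoop_iff]
      simp only [decide_eq_true_iff]
      constructor
      · intro hall
        refine ⟨h2, ?_⟩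
        by_contra hnp
        have hq := Nat.minFac_prime (n := m.toNat) (by omega)
        have hqd : m.toNat.minFac ∣ m.toNat := Nat.minFac_dvd _
        have hqsq : m.toNat.minFac ^ 2 ≤ m.toNat := Nat.minFac_sq_le_self (by omega) hnp
        have hq2 : m.toNat.minFac ≠ 2 := by
          rintro hq2; rw [hq2] at hqd; omega
        have hqodd : m.toNat.minFac % 2 = 1 := Nat.odd_iff.mp (hq.odd_of_ne_two hq2)
        have hq3 : 3 ≤ m.toNat.minFac := by have := hq.two_le; omega
        have hrep : 3 + 2 * ((m.toNat.minFac - 3)/2) = m.toNat.minFac := by omega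
        apply hall ((m.toNat.minFac - 3)/2)
        · rw [hrep]; nlinarith [hqsq]
        · rw [hrep]; exact hqd
      · rintro ⟨-, hp⟩ k hk hdvd
        rcases hp.eq_one_or_self_of_dvd _ hdvd with h | h
        · omega
        · rw [h] at hk; nlinarith

lemma altScan_true_imp (i : Nat) : ∀ L, altScan i L = true → ∃ p ∈ L, p ∣ i := by
  intro L
  induction L with
  | nil => simp [altScan]
  | cons p ps ih =>
    simp only [altScan]
    split_ifs with h1 h2
    · simp
    · intro _
      exact ⟨p, by simp, Nat.dvd_of_mod_eq_zero (by simpa using h2)⟩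
    · intro h
      obtain ⟨q, hq, hd⟩ := ih h
      exact ⟨q, by simp [hq], hd⟩

lemma altScan_true_of (i q : Nat) (hdvd : q ∣ i) (hsq : q * q ≤ i) :
    ∀ L, List.Pairwise (· < ·) L → q ∈ L → altScan i L = true := by
  intro L
  induction L with
  | nil => simp
  | cons p ps ih =>
    intro hpw hmem
    have hple : p ≤ q := by
      rcases List.mem_cons.mp hmem with rfl | h
      · exact le_refl _
      · exact le_of_lt ((List.pairwise_cons.mp hpw).1 _ h)
    simp only [altScan]
    rw [if_neg (by push Not; nlinarith)]
    by_cases hmod : i % p = 0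
    · simp [hmod]
    · rw [if_neg (by simpa using hmod)]
      rcases List.mem_cons.mp hmem with rfl | h
      · exact absurd (Nat.mod_eq_zero_of_dvd hdvd) hmod
      · exact ih (List.pairwise_cons.mp hpw).2 h

lemma mem_primesUpto {p i : Nat} : p ∈ primesUpto i ↔ p < i ∧ Nat.Prime p := by
  simp [primesUpto, List.mem_filter]

lemma altScan_spec (i : Nat) (h2 : 2 ≤ i) : altScan i (primesUpto i) = !decide (Nat.Prime i) := by
  by_cases hp : Nat.Prime i
  · simp only [hp, decide_true, Bool.not_true]
    rw [Bool.eq_false_iff]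
    intro htrue
    obtain ⟨q, hq, hd⟩ := altScan_true_imp i _ htrue
    rw [mem_primesUpto] at hq
    rcases hp.eq_one_or_self_of_dvd q hd with h | h
    · exact absurd h (by have := hq.2.two_le; omega)
    · omega
  · simp only [hp, decide_false, Bool.not_false]
    have hq := Nat.minFac_prime (n := i) (by omega)
    have hqd : i.minFac ∣ i := Nat.minFac_dvd _
    have hqsq : i.minFac ^ 2 ≤ i := Nat.minFac_sq_le_self (by omega) hp
    have hqlt : i.minFac < i := by nlinarith [hq.two_le]
    apply altScan_true_of i i.minFac hqd (by nlinarith)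
    · exact (List.pairwise_lt_range).filter _
    · exact mem_primesUpto.mpr ⟨hqlt, hq⟩

lemma primesUpto_succ_prime {i : Nat} (hp : Nat.Prime i) : primesUpto (i+1) = primesUpto i ++ [i] := by
  simp [primesUpto, List.range_succ, List.filter_append, hp]

lemma primesUpto_succ_not_prime {i : Nat} (hp : ¬ Nat.Prime i) : primesUpto (i+1) = primesUpto i := by
  simp [primesUpto, List.range_succ, List.filter_append, hp]

lemma altGo_spec (arr : List Int) : ∀ fuel i, arr.length - i = fuel → 2 ≤ i →
    altGo arr i (primesUpto i) =
      (List.range' i fuel).any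
        (fun j => decide (Nat.Prime j) && altValuePrime (arr.getD j 0)) := by
  intro fuel
  induction fuel with
  | zero =>
    intro i hf h2
    rw [altGo, dif_neg (by omega)]
    simp
  | succ f ih =>
    intro i hf h2
    have hlt : i < arr.length := by omega
    rw [altGo, dif_pos hlt, altScan_spec i h2, List.range'_succ, List.any_cons]
    have hget : arr.getD i 0 = arr[i] := List.getD_eq_getElem arr 0 hlt
    by_cases hp : Nat.Prime i
    · simp only [hp, decide_true, Bool.not_true, Bool.true_and, hget]
      by_cases hv : altValuePrime arr[i]
      · simp [hv]
      · simp only [hv, Bool.false_or]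
        rw [← primesUpto_succ_prime hp]
        exact ih (i+1) (by omega) (by omega)
    · simp only [hp, decide_false, Bool.not_false, if_true, Bool.false_and, Bool.false_or]
      rw [← primesUpto_succ_not_prime hp]
      exact ih (i+1) (by omega) (by omega)

lemma aIsPrime_natCast (j : Nat) : aIsPrime (j : Int) = decide (Nat.Prime j) := by
  rw [aIsPrime_eq]
  simp only [Int.toNat_natCast, decide_eq_decide]
  constructor
  · rintro ⟨-, hp⟩; exact hp
  · intro hp; exact ⟨by exact_mod_cast hp.two_le, hp⟩

lemma range_any_eq_range'_any (arr : List Int) :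
    (List.range arr.length).any
        (fun j => decide (Nat.Prime j) && altValuePrime (arr.getD j 0)) =
      (List.range' 2 (arr.length - 2)).any
        (fun j => decide (Nat.Prime j) && altValuePrime (arr.getD j 0)) := by
  by_cases hlen : 2 ≤ arr.length
  · have hsplit : List.range arr.length = List.range' 0 2 ++ List.range' 2 (arr.length - 2) := by
      rw [List.range_eq_range']
      have h1 : (2 : Nat) = 0 + 1 * 2 := by omega
      calc List.range' 0 arr.length = List.range' 0 (2 + (arr.length - 2)) := by congr 1; omega
        _ = List.range' 0 2 ++ List.range' (0 + 1 * 2) (arr.length - 2) := (List.range'_append).symm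
        _ = List.range' 0 2 ++ List.range' 2 (arr.length - 2) := by norm_num
    rw [hsplit, List.any_append]
    have h0 : (List.range' 0 2).any
        (fun j => decide (Nat.Prime j) && altValuePrime (arr.getD j 0)) = false := by
      simp [List.range']
      constructor
      · intro h; exact absurd h Nat.not_prime_zero
      · intro h; exact absurd h Nat.not_prime_one
    rw [h0, Bool.false_or]
  · have h2 : arr.length - 2 = 0 := by omega
    rw [h2]
    interval_cases h : arr.length
    · simp [List.range_zero, List.range']
    · simp [List.range_succ, List.range']
      intro h; exact absurd h Nat.not_prime_zero

-- ===== VERDICT (by name: the statement is the Claim_ definition above) =====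
theorem is_prime_with_prime_index_spec : Claim_equal_is_prime_with_prime_index := by
  intro arr _
  unfold Spec_is_prime_with_prime_index is_prime_with_prime_index is_prime_with_prime_index_alt
  have hB : altGo arr 2 [] =
      (List.range' 2 (arr.length - 2)).any
        (fun j => decide (Nat.Prime j) && altValuePrime (arr.getD j 0)) := by
    have h0 : primesUpto 2 = [] := by
      simp [primesUpto, List.range_succ]
      decide
    rw [← h0]
    exact altGo_spec arr (arr.length - 2) 2 rfl (le_refl 2)
  rw [hB, ← range_any_eq_range'_any]
  rw [PySem.List.pyRange_zero_natCast]
  simp only [List.filter_map, List.map_map, List.any_map, List.any_filter]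
  refine List.any_congr rfl (fun j => ?_)
  simp only [Function.comp]
  rw [aIsPrime_natCast, PySem.List.pyGetD_natCast, altValuePrime_eq]
  congr 1
  rw [aIsPrime_eq]
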